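-- pv_equiv track=rewrite | github.com/KatTayar/Python_Class | UtilityFunctions.py | addAfter
-- ===== SOURCE A (Python) =====
-- def addAfter(s, sym):
--     new_s = ''
--     for c in s:
--         if c == ' ':
--             new_s += ' '
--         else:
--             new_s += c + sym
--     return new_s
-- ===== SOURCE B (Python) =====
-- def addAfter(s, sym):
--     tokens = s.split(' ')
--     return ' '.join(''.join(c + sym for c in token) for token in tokens)
-- ===== Notes on version B (the rewrite author's own statement) =====
-- stated objective: alternative
-- what changed: B tokenizes on ' ' with split, appends sym after every character of each token, and rejoins with ' '.join, instead of A's flat character loop that tests each character against ' ' while accumulating a string.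
import Mathlib
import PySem

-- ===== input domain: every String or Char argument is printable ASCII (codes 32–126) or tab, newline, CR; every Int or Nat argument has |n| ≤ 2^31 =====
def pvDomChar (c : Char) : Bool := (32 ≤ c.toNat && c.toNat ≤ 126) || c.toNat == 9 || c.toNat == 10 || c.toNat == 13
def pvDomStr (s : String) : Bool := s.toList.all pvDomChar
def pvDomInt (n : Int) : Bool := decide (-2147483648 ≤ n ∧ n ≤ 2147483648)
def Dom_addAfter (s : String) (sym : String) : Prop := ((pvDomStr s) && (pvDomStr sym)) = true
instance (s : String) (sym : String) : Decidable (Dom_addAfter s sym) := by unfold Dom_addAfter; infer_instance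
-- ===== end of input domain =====

-- B tokenizes on ' ' and rejoins with ' '.join instead of A's flat character loop; alternative decomposition, same output.


-- ===== PORT A =====
-- flat loop: for c in s, append ' ' or c + sym to the accumulator
def addAfter (s : String) (sym : String) : String :=
  String.mk (s.toList.foldl
    (fun new_s c => new_s ++ (if c == ' ' then [' '] else c :: sym.toList)) [])

-- ===== PORT B =====
-- s.split(' ')  →  List.splitOn ' ';  ' '.join  →  List.intercalate [' ']
def addAfter_alt (s : String) (sym : String) : String :=
  String.mk (List.intercalate [' ']
    ((s.toList.splitOn ' ').map (fun token => token.flatMap (fun c => c :: sym.toList))))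

-- ===== PRECONDITION & SPEC =====
def Spec_addAfter (s : String) (sym : String) (out : String) : Prop := out = addAfter_alt s sym
instance (s : String) (sym : String) (out : String) : Decidable (Spec_addAfter s sym out) := by unfold Spec_addAfter; infer_instance

-- ===== CLAIM (what is proved, stated in full; the proofs are below) =====
def Claim_equal_addAfter : Prop := ∀ (s : String) (sym : String), Dom_addAfter s sym → Spec_addAfter s sym (addAfter s sym)

-- ===== LEMMAS AND PROOFS =====

theorem intercalate_cons_of_ne_nil {α : Type} (sep x : List α) (xs : List (List α))
    (h : xs ≠ []) : List.intercalate sep (x :: xs) = x ++ sep ++ List.intercalate sep xs := by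
  cases xs with
  | nil => exact absurd rfl h
  | cons y ys => simp [List.intercalate]

theorem splitOn_join_key (symL : List Char) (cs : List Char) :
    List.intercalate [' ']
      ((cs.splitOn ' ').map (fun token => token.flatMap (fun c => c :: symL)))
    = cs.flatMap (fun c => if c == ' ' then [' '] else c :: symL) := by
  induction cs with
  | nil => simp [List.splitOn, List.splitOnP_nil, List.intercalate]
  | cons c rest ih =>
    by_cases hc : c = ' '
    · subst hc
      rw [show (' ' :: rest).splitOn ' ' = [] :: rest.splitOn ' ' by
            simp [List.splitOn, List.splitOnP_cons]]
      rw [List.map_cons,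
          intercalate_cons_of_ne_nil [' '] _ _ (by
            simp only [ne_eq, List.map_eq_nil_iff]
            exact List.splitOnP_ne_nil _ _)]
      simp [ih]
    · rw [show (c :: rest).splitOn ' ' = List.modifyHead (List.cons c) (rest.splitOn ' ') by
            simp [List.splitOn, List.splitOnP_cons, hc]]
      rcases h : rest.splitOn ' ' with _ | ⟨t, ts⟩
      · exact absurd h (List.splitOnP_ne_nil _ _)
      · rw [h] at ih
        cases ts with
        | nil => simp_all [List.intercalate]
        | cons u us =>
          have hne : (List.map (fun token => List.flatMap (fun c => c :: symL) token) (u :: us)) ≠ [] := by simp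
          rw [List.modifyHead, List.map_cons, List.map_cons] at *
          rw [intercalate_cons_of_ne_nil [' '] _ _ hne]
          rw [intercalate_cons_of_ne_nil [' '] _ _ hne] at ih
          simp only [List.flatMap_cons, List.append_assoc] at *
          rw [ih, if_neg (show ¬((c == ' ') = true) by simp [hc])]

-- ===== VERDICT (by name: the statement is the Claim_ definition above) =====
theorem addAfter_spec : Claim_equal_addAfter := by
  intro s sym _
  unfold Spec_addAfter addAfter addAfter_alt
  rw [PySem.List.foldl_append_eq_flatMap, splitOn_join_key]
  rfl
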